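-- pv_equiv track=rewrite | github.com/bill-osienski/TwixT | autoTune.py | get_bucket_from_origin
-- ===== SOURCE A (Python) =====
-- from typing import Any, Dict, Iterable, List, Optional, Sequence, Set, Tuple
--
-- BUCKET_NAMES = [
--     "soft-best",
--     "niche",
--     "trend",
--     "best",
--     "explore",
--     "mutate",
--     "anchor",
--     "other",
-- ]
--
-- def get_bucket_from_origin(origin: Optional[str]) -> str:
--     parts = (origin or "").strip().split()
--     token = parts[0] if parts else ""
--     for bucket in BUCKET_NAMES:
--         if not token and bucket == "other":
--             return bucket
--         if token == bucket or token.startswith(f"{bucket}:"):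
--             return bucket
--     return "other"
-- ===== SOURCE B (Python) =====
-- BUCKET_NAMES = [
--     "soft-best",
--     "niche",
--     "trend",
--     "best",
--     "explore",
--     "mutate",
--     "anchor",
--     "other",
-- ]
--
-- _BY_FIRST = {b[0]: b for b in BUCKET_NAMES}  # bucket first letters are all distinct
--
-- def get_bucket_from_origin(origin):
--     # single character-level pass: collect the first token's colon-free prefix
--     key = []
--     for ch in (origin or ""):
--         if ch == ':':
--             break
--         if ch.isspace():
--             if key:
--                 break
--             continue
--         key.append(ch)
--     key = "".join(key)
--     cand = _BY_FIRST.get(key[:1])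
--     return cand if cand == key else "other"
-- ===== Notes on version B (the rewrite author's own statement) =====
-- stated objective: alternative
-- what changed: B replaces A's strip/split plus per-bucket loop with startswith checks by a single character-level scan (a small state machine collecting the first token's colon-free prefix) followed by one lookup in a dict indexed by the bucket names' (all distinct) first letters and a single equality check.
import Mathlib
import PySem

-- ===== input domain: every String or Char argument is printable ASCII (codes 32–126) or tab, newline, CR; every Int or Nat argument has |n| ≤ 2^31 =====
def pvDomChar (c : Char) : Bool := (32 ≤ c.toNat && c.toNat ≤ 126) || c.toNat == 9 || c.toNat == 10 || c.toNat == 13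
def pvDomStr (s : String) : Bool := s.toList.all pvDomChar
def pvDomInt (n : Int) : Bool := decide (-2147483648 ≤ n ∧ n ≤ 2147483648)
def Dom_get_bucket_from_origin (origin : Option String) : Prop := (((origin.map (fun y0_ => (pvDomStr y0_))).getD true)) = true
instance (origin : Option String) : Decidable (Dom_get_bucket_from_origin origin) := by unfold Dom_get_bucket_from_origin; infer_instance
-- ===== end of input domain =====

-- B replaces A's strip/split + per-bucket loop with startswith checks by one character-level
-- scan collecting the first token's colon-free prefix, then one lookup in a dict keyed by the
-- buckets' (distinct) first letters and a single equality check: a different decomposition.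

-- ===== PORT A =====
def pvBucketNames : List String :=
  ["soft-best", "niche", "trend", "best", "explore", "mutate", "anchor", "other"]

-- the 'for bucket in BUCKET_NAMES' loop of A, branch for branch
def pvBucketLoop (token : String) : List String → String
  | [] => "other"
  | b :: rest =>
    if token = "" ∧ b = "other" then b
    else if token = b ∨ PySem.Str.startswith token (b ++ ":") = true then b
    else pvBucketLoop token rest

def get_bucket_from_origin (origin : Option String) : String :=
  let parts := PySem.Str.split₀ (PySem.Str.strip (origin.getD ""))
  let token := match parts with
    | [] => ""
    | t :: _ => t
  pvBucketLoop token pvBucketNames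

-- ===== PORT B =====
-- _BY_FIRST = {b[0]: b for b in BUCKET_NAMES}; b[0] ported as the 1-char string take 1
def pvByFirst : PySem.Dict String String :=
  pvBucketNames.foldl
    (fun d b => PySem.Dict.insert d (String.ofList (b.toList.take 1)) b) PySem.Dict.empty

-- B's for-loop over the characters: break on ':'; on whitespace break if the key has
-- started, else continue; otherwise append the character to the key
def pvKeyLoop (key : List Char) : List Char → List Char
  | [] => key
  | c :: rest =>
    if c = ':' then key
    else if PySem.Chars.isspace c then (if key ≠ [] then key else pvKeyLoop key rest)
    else pvKeyLoop (key ++ [c]) rest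

def get_bucket_from_origin_alt (origin : Option String) : String :=
  let key := String.ofList (pvKeyLoop [] (origin.getD "").toList)
  -- cand = _BY_FIRST.get(key[:1]); key[:1] ported as take 1
  match PySem.Dict.get? pvByFirst (String.ofList (key.toList.take 1)) with
  | some cand => if cand = key then cand else "other"
  | none => "other"

-- ===== PRECONDITION & SPEC =====
def Spec_get_bucket_from_origin (origin : Option String) (out : String) : Prop := out = get_bucket_from_origin_alt origin
instance (origin : Option String) (out : String) : Decidable (Spec_get_bucket_from_origin origin out) := by unfold Spec_get_bucket_from_origin; infer_instance

-- ===== CLAIM (what is proved, stated in full; the proofs are below) =====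
def Claim_equal_get_bucket_from_origin : Prop := ∀ (origin : Option String), Dom_get_bucket_from_origin origin → Spec_get_bucket_from_origin origin (get_bucket_from_origin origin)

-- ===== LEMMAS AND PROOFS =====

-- A's per-bucket test (exact match or "bucket:" prefix) holds iff the
-- colon-free prefix of the token is exactly the bucket name
lemma pv_match_iff (t b : String) (hb : ':' ∉ b.toList) :
    (t = b ∨ PySem.Str.startswith t (b ++ ":") = true)
      ↔ t.toList.takeWhile (fun c => c ≠ ':') = b.toList := by
  constructor
  · rintro (rfl | hpre)
    · rw [List.takeWhile_eq_self_iff]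
      intro c hc
      simp
      exact fun h => hb (h ▸ hc)
    · rw [PySem.Str.startswith_eq, PySem.Chars.startswith_iff] at hpre
      obtain ⟨r, hr⟩ := hpre
      have : t.toList = b.toList ++ ':' :: r := by
        rw [← hr]; simp
      rw [this, List.takeWhile_append]
      simp
      intro _ x hx hxx
      exact hb (hxx ▸ hx)
  · intro hk
    have hsplit := List.takeWhile_append_dropWhile (p := fun c : Char => c ≠ ':') (l := t.toList)
    rw [hk] at hsplit
    cases hd : t.toList.dropWhile (fun c => c ≠ ':') with
    | nil =>
      left
      apply String.toList_inj.mp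
      rw [← hsplit, hd, List.append_nil]
    | cons x r =>
      right
      have hx : x = ':' := by
        have := List.head?_dropWhile_not (p := fun c : Char => c ≠ ':') (l := t.toList)
        rw [hd] at this
        simpa using this
      rw [PySem.Str.startswith_eq, PySem.Chars.startswith_iff]
      refine ⟨r, ?_⟩
      rw [← hsplit, hd, hx]
      simp

-- A's loop, against the full literal bucket list, is membership of the colon-free prefix
lemma pv_main (t : String) :
    pvBucketLoop t pvBucketNames
      = (if String.ofList (t.toList.takeWhile (fun c => c ≠ ':')) ∈ pvBucketNames
          then String.ofList (t.toList.takeWhile (fun c => c ≠ ':')) else "other") := by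
  by_cases ht : t = ""
  · subst ht; decide
  · have hm : ∀ b : String, ':' ∉ b.toList →
        ((t = b ∨ PySem.Str.startswith t (b ++ ":") = true)
          ↔ t.toList.takeWhile (fun c => c ≠ ':') = b.toList) := fun b hb => pv_match_iff t b hb
    simp only [pvBucketLoop, pvBucketNames, List.mem_cons, List.not_mem_nil, or_false,
      String.ofList_eq, ht, false_and, if_false,
      hm "soft-best" (by decide), hm "niche" (by decide), hm "trend" (by decide),
      hm "best" (by decide), hm "explore" (by decide), hm "mutate" (by decide),
      hm "anchor" (by decide), hm "other" (by decide)]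
    split_ifs <;> simp_all

-- split₀.go with a nonempty accumulator just prepends the accumulator (reversed)
lemma pv_split_go_acc : ∀ (l cur : List Char) (acc : List (List Char)),
    PySem.Chars.split₀.go l cur acc = acc.reverse ++ PySem.Chars.split₀.go l cur [] := by
  intro l
  induction l with
  | nil =>
    intro cur acc
    simp only [PySem.Chars.split₀.go]
    by_cases h : cur.isEmpty <;> simp [h]
  | cons c rest ih =>
    intro cur acc
    simp only [PySem.Chars.split₀.go]
    by_cases hsp : PySem.Chars.isspace c
    · by_cases hc : cur.isEmpty
      · simp only [hsp, hc, if_true]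
        exact ih [] acc
      · simp only [hsp, hc, if_true, Bool.false_eq_true, if_false]
        rw [ih [] (cur.reverse :: acc), ih [] [cur.reverse]]
        simp
    · simp only [hsp, Bool.false_eq_true, if_false]
      exact ih (c :: cur) acc

-- in the middle of a word, split₀.go's first piece is the rest of the word
lemma pv_split_go_word : ∀ (l cur : List Char), cur ≠ [] →
    ∃ tail, PySem.Chars.split₀.go l cur []
      = (cur.reverse ++ l.takeWhile (fun c => !PySem.Chars.isspace c)) :: tail := by
  intro l
  induction l with
  | nil =>
    intro cur hcur
    refine ⟨[], ?_⟩
    simp [PySem.Chars.split₀.go, List.isEmpty_iff, hcur]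
  | cons c rest ih =>
    intro cur hcur
    simp only [PySem.Chars.split₀.go]
    by_cases hsp : PySem.Chars.isspace c
    · simp only [hsp, if_true, List.isEmpty_iff, hcur, if_false]
      rw [pv_split_go_acc]
      refine ⟨PySem.Chars.split₀.go rest [] [], ?_⟩
      simp [hsp]
    · simp only [hsp, Bool.false_eq_true, if_false]
      obtain ⟨tail, htail⟩ := ih (c :: cur) (by simp)
      refine ⟨tail, ?_⟩
      rw [htail]
      simp [hsp]

-- the first piece of s.split() is the first maximal non-space run after the leading spaces
lemma pv_split_head (l : List Char) :
    (PySem.Chars.split₀ l).headD []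
      = (l.dropWhile PySem.Chars.isspace).takeWhile (fun c => !PySem.Chars.isspace c) := by
  unfold PySem.Chars.split₀
  induction l with
  | nil => simp [PySem.Chars.split₀.go]
  | cons c rest ih =>
    by_cases hsp : PySem.Chars.isspace c
    · simpa [PySem.Chars.split₀.go, hsp] using ih
    · obtain ⟨tail, htail⟩ := pv_split_go_word rest [c] (by simp)
      simp [PySem.Chars.split₀.go, hsp, htail]

-- appending an all-whitespace suffix does not change the first maximal non-space run
lemma pv_tok_append_ws (r t : List Char) (hws : ∀ c ∈ t, PySem.Chars.isspace c = true) :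
    ((r ++ t).dropWhile PySem.Chars.isspace).takeWhile (fun c => !PySem.Chars.isspace c)
      = (r.dropWhile PySem.Chars.isspace).takeWhile (fun c => !PySem.Chars.isspace c) := by
  have htt : t.takeWhile (fun c => !PySem.Chars.isspace c) = [] := by
    rw [List.takeWhile_eq_nil_iff]
    intro hl
    simp [List.get_eq_getElem, hws _ (List.getElem_mem hl)]
  rw [List.dropWhile_append]
  by_cases hre : (r.dropWhile PySem.Chars.isspace).isEmpty
  · rw [List.isEmpty_iff] at hre
    rw [hre]
    simp only [List.isEmpty_nil, if_true, List.takeWhile_nil]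
    rw [List.dropWhile_eq_nil_iff.mpr hws]
    rfl
  · simp only [hre, Bool.false_eq_true, if_false]
    rw [List.takeWhile_append]
    split_ifs with hlen
    · rw [htt, List.append_nil]
      exact ((List.takeWhile_prefix _).eq_of_length hlen).symm
    · rfl

-- stripping trailing whitespace does not change the first maximal non-space run
lemma pv_rstrip_token (m : List Char) :
    ((PySem.Chars.rstrip m).dropWhile PySem.Chars.isspace).takeWhile (fun c => !PySem.Chars.isspace c)
      = (m.dropWhile PySem.Chars.isspace).takeWhile (fun c => !PySem.Chars.isspace c) := by
  have hdec : m = PySem.Chars.rstrip m ++ (m.reverse.takeWhile PySem.Chars.isspace).reverse := by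
    unfold PySem.Chars.rstrip
    rw [← List.reverse_append, List.takeWhile_append_dropWhile, List.reverse_reverse]
  conv_rhs => rw [hdec]
  rw [pv_tok_append_ws]
  intro c hc
  exact List.mem_takeWhile_imp (List.mem_reverse.mp hc)

-- A's token (first piece of (origin or "").strip().split(), else "") as a dropWhile/takeWhile
lemma pv_token (s : String) :
    (match PySem.Str.split₀ (PySem.Str.strip s) with
      | [] => ""
      | t :: _ => t).toList
      = (s.toList.dropWhile PySem.Chars.isspace).takeWhile (fun c => !PySem.Chars.isspace c) := by
  have h1 : (match PySem.Str.split₀ (PySem.Str.strip s) with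
      | [] => "" | t :: _ => t).toList
      = (PySem.Chars.split₀ (PySem.Str.strip s).toList).headD [] := by
    unfold PySem.Str.split₀
    cases PySem.Chars.split₀ (PySem.Str.strip s).toList <;> simp
  rw [h1, pv_split_head, PySem.Str.toList_strip]
  unfold PySem.Chars.strip PySem.Chars.lstrip
  rw [pv_rstrip_token]
  cases hdw : s.toList.dropWhile PySem.Chars.isspace with
  | nil => simp
  | cons c cs =>
    have hsp : ¬ PySem.Chars.isspace c = true := by
      have := List.head?_dropWhile_not (p := PySem.Chars.isspace) (l := s.toList)
      rw [hdw] at this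
      simpa using this
    rw [List.dropWhile_cons_of_neg hsp]

-- phase 1 of B's loop: with an empty key, leading whitespace is skipped
lemma pv_keyLoop_skip : ∀ (l : List Char),
    pvKeyLoop [] l = pvKeyLoop [] (l.dropWhile PySem.Chars.isspace) := by
  intro l
  induction l with
  | nil => rfl
  | cons c rest ih =>
    by_cases hsp : PySem.Chars.isspace c
    · have hc : c ≠ ':' := by
        intro h; subst h; exact absurd hsp (by decide)
      simpa [pvKeyLoop, hc, hsp] using ih
    · simp [hsp]

-- phase 2 of B's loop: with a nonempty key it appends until whitespace or a colon
lemma pv_keyLoop_word : ∀ (l key : List Char), key ≠ [] →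
    pvKeyLoop key l = key ++ l.takeWhile (fun c => !PySem.Chars.isspace c && c ≠ ':') := by
  intro l
  induction l with
  | nil => intro key _; simp [pvKeyLoop]
  | cons c rest ih =>
    intro key hkey
    by_cases hc : c = ':'
    · subst hc; simp [pvKeyLoop]
    · by_cases hsp : PySem.Chars.isspace c
      · simp [pvKeyLoop, hc, hsp, hkey]
      · rw [List.takeWhile_cons]
        simp only [pvKeyLoop, hc, if_false, hsp, Bool.false_eq_true, if_false]
        rw [ih (key ++ [c]) (by simp)]
        simp [hc]

-- B's whole scan is the colon-free prefix of A's token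
lemma pv_key (l : List Char) :
    pvKeyLoop [] l
      = ((l.dropWhile PySem.Chars.isspace).takeWhile
          (fun c => !PySem.Chars.isspace c)).takeWhile (fun c => c ≠ ':') := by
  rw [pv_keyLoop_skip, List.takeWhile_takeWhile]
  have hp : (fun a => decide ((decide (a ≠ ':') = true) ∧ ((!PySem.Chars.isspace a) = true)))
      = (fun c => !PySem.Chars.isspace c && decide (c ≠ ':')) := by
    funext x
    by_cases h1 : x = ':' <;> by_cases h2 : PySem.Chars.isspace x <;> simp [h1, h2]
  rw [hp]
  cases hdw : l.dropWhile PySem.Chars.isspace with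
  | nil => rfl
  | cons c rest =>
    have hsp : ¬ PySem.Chars.isspace c = true := by
      have := List.head?_dropWhile_not (p := PySem.Chars.isspace) (l := l)
      rw [hdw] at this
      simpa using this
    by_cases hc : c = ':'
    · subst hc
      simp [pvKeyLoop, hsp]
    · have h1 : pvKeyLoop [] (c :: rest) = pvKeyLoop [c] rest := by
        simp [pvKeyLoop, hc, hsp]
      rw [h1, pv_keyLoop_word rest [c] (by simp), List.takeWhile_cons]
      simp [hsp, hc]

-- B's dict dispatch equals membership in the bucket list
lemma pv_dispatch (k : List Char) :
    (match PySem.Dict.get? pvByFirst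
        (String.ofList ((String.ofList k).toList.take 1)) with
      | some cand => if cand = String.ofList k then cand else "other"
      | none => "other")
      = (if String.ofList k ∈ pvBucketNames then String.ofList k else "other") := by
  by_cases hmem : String.ofList k ∈ pvBucketNames
  · generalize hs : String.ofList k = t at hmem ⊢
    simp only [pvBucketNames, List.mem_cons, List.not_mem_nil, or_false] at hmem
    rcases hmem with rfl|rfl|rfl|rfl|rfl|rfl|rfl|rfl <;> decide
  · have hval : ∀ c, PySem.Dict.get? pvByFirst
        (String.ofList ((String.ofList k).toList.take 1)) = some c → c ∈ pvBucketNames := by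
      have hlit : pvByFirst = ⟨[("s", "soft-best"), ("n", "niche"), ("t", "trend"),
          ("b", "best"), ("e", "explore"), ("m", "mutate"), ("a", "anchor"), ("o", "other")]⟩ := rfl
      intro c hc
      simp only [PySem.Dict.get?, Option.map_eq_some_iff] at hc
      obtain ⟨p, hp, hpc⟩ := hc
      have hpmem := List.mem_of_find?_eq_some hp
      rw [hlit] at hpmem
      simp only [List.mem_cons, List.not_mem_nil, or_false] at hpmem
      rcases hpmem with rfl|rfl|rfl|rfl|rfl|rfl|rfl|rfl <;> simp [pvBucketNames, ← hpc]
    cases hget : PySem.Dict.get? pvByFirst (String.ofList ((String.ofList k).toList.take 1)) with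
    | none => simp [hmem]
    | some c =>
      have hc := hval c hget
      have hne : c ≠ String.ofList k := fun h => hmem (h ▸ hc)
      simp [hne, hmem]

theorem get_bucket_from_origin_spec : Claim_equal_get_bucket_from_origin := by
  intro origin _
  simp only [Spec_get_bucket_from_origin, get_bucket_from_origin, get_bucket_from_origin_alt]
  rw [pv_dispatch, pv_main, pv_key, ← pv_token (origin.getD "")]
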